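-- pv_equiv track=rewrite | github.com/azzy-chemE/Rayfield-Systems-HUVTSP | ai_summary_generator.py | create_mock_summary_user_data_only
-- ===== SOURCE A (Python) =====
-- def create_mock_summary_user_data_only(site_name, site_type, site_specs, inspections):
--     """
--     Create a mock summary using ONLY user data
--     """
--     # Process inspection data for mock summary
--     inspection_text = ""
--     if inspections:
--         inspection_text = "\n\nRECENT INSPECTIONS:\n"
--         for i, inspection in enumerate(inspections, 1):
--             date = inspection.get('date', 'Unknown date')
--             status = inspection.get('status', 'Unknown status')
--             notes = inspection.get('notes', 'No notes provided')
--             inspection_text += f"{i}. Date: {date} | Status: {status} | Notes: {notes}\n"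
--
--     # Count inspection types
--     critical_count = len([i for i in inspections if i.get('status') == 'critical'])
--     concern_count = len([i for i in inspections if 'concern' in i.get('status', '')])
--     normal_count = len([i for i in inspections if i.get('status') == 'normal'])
--
--     return f"""
-- AI Analysis Summary for {site_name}
--
-- SITE CONFIGURATION:
-- - Site Type: {site_type}
-- - Site Specifications: {site_specs}
--
-- OVERALL ASSESSMENT:
-- Based on the provided configuration, this {site_type} site appears to be properly configured for renewable energy generation. The specifications indicate a well-planned installation with appropriate capacity and technology.
--
-- {inspection_text}
--
-- INSPECTION ANALYSIS:
-- - Total Inspections: {len(inspections)}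
-- - Critical Issues: {critical_count}
-- - Concerns: {concern_count}
-- - Normal Status: {normal_count}
--
-- RECOMMENDATIONS:
-- 1. Continue regular maintenance schedule for {site_type} systems
-- 2. Address any critical inspection findings immediately
-- 3. Monitor {site_type} performance based on specifications
-- 4. Implement site-specific optimization strategies
--
-- KEY INSIGHTS:
-- - Site configuration appears appropriate for the intended purpose
-- - Inspection status provides operational guidance
-- - Maintenance priorities should align with site type requirements
-- - Risk assessment based on inspection findings
--
-- Note: This analysis is based solely on user-provided configuration and inspection data.
-- """
-- ===== SOURCE B (Python) =====
-- def create_mock_summary_user_data_only(site_name, site_type, site_specs, inspections):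
--     # One pass over the inspections: build the text and the three counters together.
--     inspection_text = "\n\nRECENT INSPECTIONS:\n" if inspections else ""
--     critical_count = concern_count = normal_count = 0
--     for i, inspection in enumerate(inspections, 1):
--         inspection_text += (
--             f"{i}. Date: {inspection.get('date', 'Unknown date')}"
--             f" | Status: {inspection.get('status', 'Unknown status')}"
--             f" | Notes: {inspection.get('notes', 'No notes provided')}\n"
--         )
--         status = inspection.get('status')
--         if status is not None:
--             if status == 'critical':
--                 critical_count += 1
--             if 'concern' in status:
--                 concern_count += 1
--             if status == 'normal':
--                 normal_count += 1
--
--     return f"""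
-- AI Analysis Summary for {site_name}
--
-- SITE CONFIGURATION:
-- - Site Type: {site_type}
-- - Site Specifications: {site_specs}
--
-- OVERALL ASSESSMENT:
-- Based on the provided configuration, this {site_type} site appears to be properly configured for renewable energy generation. The specifications indicate a well-planned installation with appropriate capacity and technology.
--
-- {inspection_text}
--
-- INSPECTION ANALYSIS:
-- - Total Inspections: {len(inspections)}
-- - Critical Issues: {critical_count}
-- - Concerns: {concern_count}
-- - Normal Status: {normal_count}
--
-- RECOMMENDATIONS:
-- 1. Continue regular maintenance schedule for {site_type} systems
-- 2. Address any critical inspection findings immediately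
-- 3. Monitor {site_type} performance based on specifications
-- 4. Implement site-specific optimization strategies
--
-- KEY INSIGHTS:
-- - Site configuration appears appropriate for the intended purpose
-- - Inspection status provides operational guidance
-- - Maintenance priorities should align with site type requirements
-- - Risk assessment based on inspection findings
--
-- Note: This analysis is based solely on user-provided configuration and inspection data.
-- """
-- ===== Notes on version B (the rewrite author's own statement) =====
-- stated objective: simpler
-- what changed: Replaced A's separate text-building loop plus three counting list comprehensions (four passes over the inspections) with a single fused loop that appends each line and bumps the three status counters as it goes.
import Mathlib
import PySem

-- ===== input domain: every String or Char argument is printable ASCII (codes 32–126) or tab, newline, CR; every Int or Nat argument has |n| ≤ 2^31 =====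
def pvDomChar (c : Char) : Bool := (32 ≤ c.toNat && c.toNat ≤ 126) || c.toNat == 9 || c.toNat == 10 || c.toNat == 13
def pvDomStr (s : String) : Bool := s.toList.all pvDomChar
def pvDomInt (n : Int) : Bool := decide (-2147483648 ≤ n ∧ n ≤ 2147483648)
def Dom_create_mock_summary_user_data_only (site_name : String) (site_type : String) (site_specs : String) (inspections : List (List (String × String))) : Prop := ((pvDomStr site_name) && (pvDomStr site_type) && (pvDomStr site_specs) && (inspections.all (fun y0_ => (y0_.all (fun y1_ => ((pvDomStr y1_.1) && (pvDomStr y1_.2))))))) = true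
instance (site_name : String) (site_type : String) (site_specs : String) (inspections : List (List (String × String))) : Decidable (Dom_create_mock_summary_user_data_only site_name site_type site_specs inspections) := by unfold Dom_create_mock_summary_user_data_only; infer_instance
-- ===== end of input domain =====

-- B fuses A's text-building loop and three counting comprehensions into a single pass; objective: simpler.


-- ===== PORT A =====
-- one line of A's inspection loop body
def pvALine (p : Int × List (String × String)) : String :=
  let d := PySem.Dict.mk p.2
  let date := d.getD "date" "Unknown date"
  let status := d.getD "status" "Unknown status"
  let notes := d.getD "notes" "No notes provided"
  PySem.Int.toStr p.1 ++ ". Date: " ++ date ++ " | Status: " ++ status ++ " | Notes: " ++ notes ++ "\n"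

-- the final f-string, shared verbatim by both ports (pure output formatting)
def pvReport (site_name site_type site_specs inspection_text : String)
    (total critical_count concern_count normal_count : Int) : String :=
  "\nAI Analysis Summary for " ++ site_name ++
  "\n\nSITE CONFIGURATION:\n- Site Type: " ++ site_type ++
  "\n- Site Specifications: " ++ site_specs ++
  "\n\nOVERALL ASSESSMENT:\nBased on the provided configuration, this " ++ site_type ++
  " site appears to be properly configured for renewable energy generation. The specifications indicate a well-planned installation with appropriate capacity and technology.\n\n" ++
  inspection_text ++
  "\n\nINSPECTION ANALYSIS:\n- Total Inspections: " ++ PySem.Int.toStr total ++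
  "\n- Critical Issues: " ++ PySem.Int.toStr critical_count ++
  "\n- Concerns: " ++ PySem.Int.toStr concern_count ++
  "\n- Normal Status: " ++ PySem.Int.toStr normal_count ++
  "\n\nRECOMMENDATIONS:\n1. Continue regular maintenance schedule for " ++ site_type ++
  " systems\n2. Address any critical inspection findings immediately\n3. Monitor " ++ site_type ++
  " performance based on specifications\n4. Implement site-specific optimization strategies\n\nKEY INSIGHTS:\n- Site configuration appears appropriate for the intended purpose\n- Inspection status provides operational guidance\n- Maintenance priorities should align with site type requirements\n- Risk assessment based on inspection findings\n\nNote: This analysis is based solely on user-provided configuration and inspection data.\n"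

def create_mock_summary_user_data_only (site_name : String) (site_type : String) (site_specs : String) (inspections : List (List (String × String))) : String :=
  let inspection_text :=
    if inspections.isEmpty then ""
    else (PySem.List.enumerate inspections 1).foldl (fun t p => t ++ pvALine p) "\n\nRECENT INSPECTIONS:\n"
  let critical_count := (inspections.filter (fun i => (PySem.Dict.mk i).get? "status" == some "critical")).length
  let concern_count := (inspections.filter (fun i => PySem.Str.isIn "concern" ((PySem.Dict.mk i).getD "status" ""))).length
  let normal_count := (inspections.filter (fun i => (PySem.Dict.mk i).get? "status" == some "normal")).length
  pvReport site_name site_type site_specs inspection_text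
    (inspections.length : Int) (critical_count : Int) (concern_count : Int) (normal_count : Int)

-- ===== PORT B =====
-- one fused loop step: append the line and bump the counters
def pvBStep (st : String × Int × Int × Int) (p : Int × List (String × String)) : String × Int × Int × Int :=
  let d := PySem.Dict.mk p.2
  let text := st.1 ++ PySem.Int.toStr p.1 ++ ". Date: " ++ d.getD "date" "Unknown date" ++
    " | Status: " ++ d.getD "status" "Unknown status" ++ " | Notes: " ++ d.getD "notes" "No notes provided" ++ "\n"
  match d.get? "status" with
  | none => (text, st.2.1, st.2.2.1, st.2.2.2)
  | some s =>
      (text,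
       st.2.1 + (if s = "critical" then 1 else 0),
       st.2.2.1 + (if PySem.Str.isIn "concern" s then 1 else 0),
       st.2.2.2 + (if s = "normal" then 1 else 0))

def create_mock_summary_user_data_only_alt (site_name : String) (site_type : String) (site_specs : String) (inspections : List (List (String × String))) : String :=
  let init : String × Int × Int × Int := (if inspections.isEmpty then "" else "\n\nRECENT INSPECTIONS:\n", 0, 0, 0)
  let st := (PySem.List.enumerate inspections 1).foldl pvBStep init
  pvReport site_name site_type site_specs st.1 (inspections.length : Int) st.2.1 st.2.2.1 st.2.2.2

-- ===== PRECONDITION & SPEC =====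
def Spec_create_mock_summary_user_data_only (site_name : String) (site_type : String) (site_specs : String) (inspections : List (List (String × String))) (out : String) : Prop := out = create_mock_summary_user_data_only_alt site_name site_type site_specs inspections
instance (site_name : String) (site_type : String) (site_specs : String) (inspections : List (List (String × String))) (out : String) : Decidable (Spec_create_mock_summary_user_data_only site_name site_type site_specs inspections out) := by unfold Spec_create_mock_summary_user_data_only; infer_instance

-- ===== CLAIM (what is proved, stated in full; the proofs are below) =====
def Claim_equal_create_mock_summary_user_data_only : Prop := ∀ (site_name : String) (site_type : String) (site_specs : String) (inspections : List (List (String × String))), Dom_create_mock_summary_user_data_only site_name site_type site_specs inspections → Spec_create_mock_summary_user_data_only site_name site_type site_specs inspections (create_mock_summary_user_data_only site_name site_type site_specs inspections)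

-- ===== LEMMAS AND PROOFS =====

-- the fused fold computes A's text fold and the three filter-counts
theorem pvFoldFused (l : List (List (String × String))) (n : Int) (t : String) (c1 c2 c3 : Int) :
    (PySem.List.enumerate l n).foldl pvBStep (t, c1, c2, c3) =
      ((PySem.List.enumerate l n).foldl (fun t p => t ++ pvALine p) t,
       c1 + ((l.filter (fun i => (PySem.Dict.mk i).get? "status" == some "critical")).length : Int),
       c2 + ((l.filter (fun i => PySem.Str.isIn "concern" ((PySem.Dict.mk i).getD "status" ""))).length : Int),
       c3 + ((l.filter (fun i => (PySem.Dict.mk i).get? "status" == some "normal")).length : Int)) := by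
  induction l generalizing n t c1 c2 c3 with
  | nil => simp [PySem.List.enumerate_nil]
  | cons x xs ih =>
      rw [PySem.List.enumerate_cons]
      simp only [List.foldl_cons, List.filter_cons]
      have hstep : pvBStep (t, c1, c2, c3) (n, x) =
          (t ++ pvALine (n, x),
           c1 + (if (PySem.Dict.mk x).get? "status" == some "critical" then 1 else 0),
           c2 + (if PySem.Str.isIn "concern" ((PySem.Dict.mk x).getD "status" "") then 1 else 0),
           c3 + (if (PySem.Dict.mk x).get? "status" == some "normal" then 1 else 0)) := by
        unfold pvBStep pvALine
        cases hs : (PySem.Dict.mk x).get? "status" with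
        | none =>
            simp [hs, PySem.Dict.getD_eq_get?_getD, String.append_assoc]
            decide
        | some s =>
            simp [hs, PySem.Dict.getD_eq_get?_getD, String.append_assoc]
      rw [hstep]
      rw [ih]
      simp only [Prod.mk.injEq]
      refine ⟨trivial, ?_, ?_, ?_⟩ <;> (split_ifs <;> push_cast [List.length_cons] <;> omega)

theorem create_mock_summary_agree (site_name site_type site_specs : String)
    (inspections : List (List (String × String))) :
    create_mock_summary_user_data_only site_name site_type site_specs inspections =
      create_mock_summary_user_data_only_alt site_name site_type site_specs inspections := by
  unfold create_mock_summary_user_data_only create_mock_summary_user_data_only_alt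
  dsimp only
  rw [pvFoldFused]
  cases inspections with
  | nil => simp [PySem.List.enumerate_nil]
  | cons x xs => simp

-- ===== VERDICT (by name: the statement is the Claim_ definition above) =====
theorem create_mock_summary_user_data_only_spec : Claim_equal_create_mock_summary_user_data_only := by
  intro site_name site_type site_specs inspections _
  exact create_mock_summary_agree site_name site_type site_specs inspections
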